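-- pv_equiv track=rewrite | github.com/null-lambda/pictopix-solver | nonogram_bruteforce.py | _gen_line_candidates
-- ===== SOURCE A (Python) =====
-- from typing import List, Tuple
--
-- Line = List[int]
--
-- Clue = Tuple[int]
--
-- def partition(n, k):
--     if k == 0:
--         yield tuple()
--         return
--     for x in range(0, n + 1):
--         for y in partition(n - x, k - 1):
--             yield y + (x,)
--
-- def _gen_line_candidates(clue: Clue, line: Line) -> [Line]:
--     n, k = len(line), len(clue)
--     n_filled = sum(clue)
--     n_gap = k - 1
--     n_free = n - n_filled - n_gap
--     cands = []
--
--     for idx_shifts in partition(n_free, k):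
--         cand = [0] * n
--         idx = 0
--         for l, idx_shift in zip(clue, idx_shifts[::-1]):
--             idx += idx_shift
--             for _ in range(l):
--                 cand[idx] = 1
--                 idx += 1
--             idx += 1
--         cands.append(cand)
--     return cands
-- ===== SOURCE B (Python) =====
-- def _gen_line_candidates(clue, line):
--     n = len(line)
--     n_free = n - sum(clue) - (len(clue) - 1)
--     if n_free < 0:
--         return []
--     out = []
--
--     def go(prefix, blocks, free):
--         if not blocks:
--             out.append(prefix + [0] * (n - len(prefix)))
--             return
--         first, rest = blocks[0], blocks[1:]
--         sep = [0] if rest else []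
--         for gap in range(free + 1):
--             if len(prefix) + gap + first + len(sep) > n:
--                 break
--             go(prefix + [0] * gap + [1] * first + sep, rest, free - gap)
--
--     go([], list(clue), n_free)
--     return out
-- ===== Notes on version B (the rewrite author's own statement) =====
-- stated objective: alternative
-- what changed: Instead of enumerating shift tuples with a recursive partition generator and then filling a mutable zero array by index arithmetic for each tuple, B builds every candidate line directly by one recursion over the clue blocks that extends an immutable prefix with gap zeros, block ones and a separator (stopping a gap loop as soon as the block no longer fits the line), so no partition tuples, reversal, zip or in-place writes exist.
-- outside the precondition, e.g. on _gen_line_candidates((-1,), []): A returns [[], []], B returns [[], [0]]; on _gen_line_candidates((-1, 1), [0]): A raises IndexError, B returns []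
import Mathlib
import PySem

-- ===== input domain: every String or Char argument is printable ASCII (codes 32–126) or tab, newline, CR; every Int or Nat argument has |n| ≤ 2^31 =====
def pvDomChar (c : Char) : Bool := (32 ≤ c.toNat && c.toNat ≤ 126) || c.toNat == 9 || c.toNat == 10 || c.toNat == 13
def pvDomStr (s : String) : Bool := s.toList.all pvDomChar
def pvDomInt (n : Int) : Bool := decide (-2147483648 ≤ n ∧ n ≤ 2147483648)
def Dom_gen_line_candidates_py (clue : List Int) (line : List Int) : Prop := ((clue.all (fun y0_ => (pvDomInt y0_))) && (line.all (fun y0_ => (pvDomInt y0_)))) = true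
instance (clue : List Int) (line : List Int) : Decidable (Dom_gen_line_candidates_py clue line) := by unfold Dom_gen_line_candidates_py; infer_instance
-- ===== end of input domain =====

-- B replaces A's two-phase "enumerate shift tuples, then fill a mutable array" by one recursion
-- that builds each candidate line directly by appending gap zeros, block ones and a separator (alternative decomposition, same cost).

-- ===== PORT A =====
-- generator `partition(n, k)` as the list of tuples it yields, in yield order
def pyPartition (n : Int) (k : Nat) : List (List Int) :=
  match k with
  | 0 => [[]]
  | k + 1 =>
      (PySem.List.pyRange 0 (n + 1) 1).flatMap (fun x =>
        (pyPartition (n - x) k).map (fun y => y ++ [x]))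

-- inner loop `for _ in range(l): cand[idx] = 1; idx += 1` (range(l) has l.toNat iterations).
-- `cand[idx] = 1` is List.set at idx.toNat: exact wherever Python does not raise IndexError
-- (guaranteed by Pre_; Python raises outside, where List.set is a no-op).
def fillOnes : Nat → List Int → Int → List Int × Int
  | 0, cand, idx => (cand, idx)
  | c + 1, cand, idx => fillOnes c (cand.set idx.toNat 1) (idx + 1)

-- loop `for l, idx_shift in zip(clue, idx_shifts[::-1]): ...`
def fillBlocks : List (Int × Int) → List Int → Int → List Int
  | [], cand, _ => cand
  | (l, s) :: rest, cand, idx =>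
      let idx1 := idx + s
      let p := fillOnes l.toNat cand idx1
      fillBlocks rest p.1 (p.2 + 1)

def gen_line_candidates_py (clue : List Int) (line : List Int) : List (List Int) :=
  let n := line.length
  let k := clue.length
  let n_filled := clue.sum
  let n_free : Int := (n : Int) - n_filled - ((k : Int) - 1)
  (pyPartition n_free k).map (fun sh =>
    fillBlocks (clue.zip sh.reverse) (List.replicate n 0) 0)

-- ===== PORT B =====
-- recursion `go(prefix, blocks, free)` from Source B; the for-loop appending into `out` is the
-- flatMap, and its `break` on the first gap that no longer fits the line is the takeWhile
def goLine (n : Nat) (pre : List Int) (blocks : List Int) (free : Int) : List (List Int) :=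
  match blocks with
  | [] => [pre ++ List.replicate (n - pre.length) 0]
  | b :: rest =>
      let sep : List Int := if rest.isEmpty then [] else [0]
      ((PySem.List.pyRange 0 (free + 1) 1).takeWhile (fun gap =>
        !decide ((pre.length : Int) + gap + b + sep.length > (n : Int)))).flatMap (fun gap =>
          goLine n (pre ++ List.replicate gap.toNat 0 ++ List.replicate b.toNat 1 ++ sep)
            rest (free - gap))

def gen_line_candidates_py_alt (clue : List Int) (line : List Int) : List (List Int) :=
  let n := line.length
  let n_free : Int := (n : Int) - clue.sum - ((clue.length : Int) - 1)
  if n_free < 0 then [] else goLine n [] clue n_free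

-- ===== PRECONDITION & SPEC =====
-- Pre_ excludes clues with a negative entry whose blocks still fit the line (n_free ≥ 0): there A's
-- index arithmetic either raises IndexError or returns lines whose shape is an accident of skipped
-- writes (see claim cites); B returns well-formed lines. When the clue does not fit (n_free < 0)
-- both return [] and the input stays inside Pre_.
def Pre_gen_line_candidates_py (clue : List Int) (line : List Int) : Prop :=
  (∀ c ∈ clue, 0 ≤ c) ∨ (line.length : Int) - clue.sum - ((clue.length : Int) - 1) < 0
instance (clue : List Int) (line : List Int) : Decidable (Pre_gen_line_candidates_py clue line) := by
  unfold Pre_gen_line_candidates_py; infer_instance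

def pvWitness_gen_line_candidates_py : List Int × List Int := ([2, 1], [0, 0, 0, 0, 0])

def Spec_gen_line_candidates_py (clue : List Int) (line : List Int) (out : List (List Int)) : Prop := out = gen_line_candidates_py_alt clue line
instance (clue : List Int) (line : List Int) (out : List (List Int)) : Decidable (Spec_gen_line_candidates_py clue line out) := by unfold Spec_gen_line_candidates_py; infer_instance

-- ===== CLAIM (what is proved, stated in full; the proofs are below) =====
def Claim_equal_gen_line_candidates_py : Prop := ∀ (clue : List Int) (line : List Int), Dom_gen_line_candidates_py clue line → Pre_gen_line_candidates_py clue line → Spec_gen_line_candidates_py clue line (gen_line_candidates_py clue line)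

-- ===== LEMMAS AND PROOFS =====

-- writing c ones into the zero suffix starting at its first cell
theorem pvFillOnes_spec (c : Nat) (pre : List Int) (m : Nat) (h : c ≤ m) :
    fillOnes c (pre ++ List.replicate m 0) (pre.length : Int)
      = (pre ++ List.replicate c 1 ++ List.replicate (m - c) 0, (pre.length : Int) + c) := by
  induction c generalizing pre m with
  | zero => simp [fillOnes]
  | succ c ih =>
      obtain ⟨m', rfl⟩ : ∃ m', m = m' + 1 := ⟨m - 1, by omega⟩
      have h1 : List.replicate (m' + 1) (0 : Int) = 0 :: List.replicate m' 0 := rfl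
      have h2 : fillOnes (c + 1) (pre ++ List.replicate (m' + 1) 0) (pre.length : Int)
          = fillOnes c ((pre ++ [1]) ++ List.replicate m' 0) (((pre ++ [1]).length : Nat) : Int) := by
        simp [fillOnes, h1, Int.toNat_natCast]
      have e1 : m' + 1 - (c + 1) = m' - c := by omega
      rw [h2, ih (pre ++ [1]) m' (by omega), e1]
      simp [Prod.ext_iff, List.replicate_succ, List.append_assoc]
      ring

theorem pvFlatMap_congr {α β : Type} (xs : List α) (f g : α → List β)
    (h : ∀ x ∈ xs, f x = g x) : xs.flatMap f = xs.flatMap g := by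
  induction xs with
  | nil => rfl
  | cons a xs ih =>
      simp [List.flatMap_cons, h a (by simp), ih (fun x hx => h x (by simp [hx]))]

-- main correspondence, generalized over the already-written prefix
theorem pvMain (blocks : List Int) (free : Int) (pre : List Int) (m : Nat)
    (hb : ∀ b ∈ blocks, 0 ≤ b) (hf : 0 ≤ free)
    (hm : blocks ≠ [] → (m : Int) = free + blocks.sum + ((blocks.length : Int) - 1)) :
    (pyPartition free blocks.length).map (fun sh =>
        fillBlocks (blocks.zip sh.reverse) (pre ++ List.replicate m 0) (pre.length : Int))
      = goLine (pre.length + m) pre blocks free := by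
  induction blocks generalizing free pre m with
  | nil => simp [pyPartition, goLine, fillBlocks]
  | cons b rest ih =>
      have hb0 : 0 ≤ b := hb b (by simp)
      have hrest : ∀ x ∈ rest, 0 ≤ x := fun x hx => hb x (by simp [hx])
      have hsum : 0 ≤ rest.sum := List.sum_nonneg hrest
      have hm' : (m : Int) = free + b + rest.sum + rest.length := by
        have h0 := hm (by simp)
        simp only [List.sum_cons, List.length_cons] at h0
        push_cast at h0 ⊢; linarith
      have hsep : ∀ g ∈ PySem.List.pyRange 0 (free + 1) 1,
          (pre.length : Int) + g + b +
              ((if rest.isEmpty then ([] : List Int) else [0]).length : Int)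
            ≤ ((pre.length + m : Nat) : Int) := by
        intro g hg
        obtain ⟨hg0, hg1⟩ := (PySem.List.mem_pyRange_one).mp hg
        rcases rest with _ | ⟨r, rs⟩
        · simp only [List.isEmpty_nil, if_pos, List.length_nil]
          simp only [List.sum_nil, List.length_nil] at hm'
          push_cast at hm' ⊢; omega
        · have h1 : (0:Int) ≤ r := hrest r (by simp)
          have h2 : (0:Int) ≤ rs.sum := List.sum_nonneg (fun x hx => hrest x (by simp [hx]))
          have h3 : (m:Int) = free + b + (r + rs.sum) + ((rs.length : Int) + 1) := by
            simpa [List.sum_cons] using hm'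
          simp only [List.isEmpty_cons, if_neg, Bool.false_eq_true, not_false_eq_true,
            List.length_cons, List.length_nil]
          push_cast; omega
      rw [show (b :: rest).length = rest.length + 1 from rfl, pyPartition,
        List.map_flatMap, goLine]
      rw [List.takeWhile_eq_self_iff.mpr (fun g hg => by
        have := hsep g hg
        simp only [Bool.not_eq_eq_eq_not, Bool.not_true, decide_eq_false_iff_not, not_lt]
        exact this)]
      apply pvFlatMap_congr
      intro g hg
      obtain ⟨hg0, hg1⟩ := (PySem.List.mem_pyRange_one).mp hg
      have hgN : ((g.toNat : Nat) : Int) = g := Int.toNat_of_nonneg hg0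
      have hbN : ((b.toNat : Nat) : Int) = b := Int.toNat_of_nonneg hb0
      have hgm : g.toNat + b.toNat ≤ m := by omega
      rw [List.map_map]
      simp only [Function.comp_def]
      have hsplit : pre ++ List.replicate m (0 : Int)
          = (pre ++ List.replicate g.toNat 0) ++ List.replicate (m - g.toNat) 0 := by
        rw [List.append_assoc, ← List.replicate_add]
        congr 2; omega
      have hones := pvFillOnes_spec b.toNat (pre ++ List.replicate g.toNat 0) (m - g.toNat)
        (by omega)
      have hstep : ∀ y : List Int,
          fillBlocks ((b :: rest).zip ((y ++ [g]).reverse)) (pre ++ List.replicate m 0)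
            (pre.length : Int)
          = fillBlocks (rest.zip y.reverse)
              ((pre ++ List.replicate g.toNat 0) ++ List.replicate b.toNat 1 ++
                List.replicate (m - g.toNat - b.toNat) 0)
              ((((pre ++ List.replicate g.toNat 0).length : Nat) : Int) + b.toNat + 1) := by
        intro y
        rw [List.reverse_append]
        show fillBlocks ((b, g) :: rest.zip y.reverse) _ _ = _
        rw [fillBlocks, hsplit]
        have hidx : (pre.length : Int) + g
            = (((pre ++ List.replicate g.toNat 0).length : Nat) : Int) := by
          simp; omega
        simp only [hidx, hones]
      rcases rest with _ | ⟨r, rs⟩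
      · -- last block: both sides are a single candidate per gap
        simp only [List.length_nil, pyPartition, List.map_cons, List.map_nil]
        rw [hstep []]
        simp only [List.zip_nil_left, fillBlocks, goLine, List.isEmpty_nil]
        simp [List.append_assoc]
        omega
      · -- more blocks follow: fold the separator zero into the prefix and recurse
        have h1 : (0:Int) ≤ r := hrest r (by simp)
        have h2 : (0:Int) ≤ rs.sum := List.sum_nonneg (fun x hx => hrest x (by simp [hx]))
        have h3 : (m:Int) = free + b + (r + rs.sum) + ((rs.length : Int) + 1) := by
          simpa [List.sum_cons] using hm'
        have hm1 : g.toNat + b.toNat + 1 ≤ m := by omega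
        have hsuffix : List.replicate (m - g.toNat - b.toNat) (0 : Int)
            = 0 :: List.replicate (m - g.toNat - b.toNat - 1) 0 := by
          have e : m - g.toNat - b.toNat = (m - g.toNat - b.toNat - 1) + 1 := by omega
          conv_lhs => rw [e]
          rw [List.replicate_succ]
        have hcand : (pre ++ List.replicate g.toNat 0) ++ List.replicate b.toNat 1 ++
              List.replicate (m - g.toNat - b.toNat) 0
            = (pre ++ List.replicate g.toNat 0 ++ List.replicate b.toNat 1 ++ [0]) ++
              List.replicate (m - g.toNat - b.toNat - 1) 0 := by
          rw [hsuffix]; simp [List.append_assoc]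
        have hidx3 : (((pre ++ List.replicate g.toNat 0).length : Nat) : Int) + b.toNat + 1
            = (((pre ++ List.replicate g.toNat 0 ++ List.replicate b.toNat 1 ++ [0]).length : Nat) : Int) := by
          simp; ring
        have hmap : List.map (fun y =>
              fillBlocks ((b :: r :: rs).zip ((y ++ [g]).reverse)) (pre ++ List.replicate m 0)
                (pre.length : Int)) (pyPartition (free - g) (r :: rs).length)
            = List.map (fun y => fillBlocks ((r :: rs).zip y.reverse)
                ((pre ++ List.replicate g.toNat 0 ++ List.replicate b.toNat 1 ++ [0]) ++
                  List.replicate (m - g.toNat - b.toNat - 1) 0)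
                (((pre ++ List.replicate g.toNat 0 ++ List.replicate b.toNat 1 ++ [0]).length : Nat) : Int))
                (pyPartition (free - g) (r :: rs).length) := by
          apply List.map_congr_left
          intro y _
          rw [hstep y, hcand, hidx3]
        rw [hmap, ih (free - g) (pre ++ List.replicate g.toNat 0 ++ List.replicate b.toNat 1 ++ [0])
          (m - g.toNat - b.toNat - 1) hrest (by omega)
          (by intro _; simp [List.sum_cons]; omega)]
        have hn : (pre ++ List.replicate g.toNat 0 ++ List.replicate b.toNat 1 ++ [0]).length +
            (m - g.toNat - b.toNat - 1) = pre.length + m := by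
          simp; omega
        rw [hn]
        simp

-- ===== VERDICT (by name: the statement is the Claim_ definition above) =====
theorem gen_line_candidates_py_spec : Claim_equal_gen_line_candidates_py := by
  intro clue line _dom hpre
  unfold Spec_gen_line_candidates_py gen_line_candidates_py gen_line_candidates_py_alt
  by_cases h : ((line.length : Int) - clue.sum - ((clue.length : Int) - 1)) < 0
  · rw [if_pos h]
    rcases clue with _ | ⟨c, cs⟩
    · exfalso; simp at h; omega
    · rw [show (c :: cs).length = cs.length + 1 from rfl]
      simp only [pyPartition]
      rw [PySem.List.pyRange_one]
      have hz : ((line.length : Int) - (c :: cs).sum - (((cs.length + 1 : Nat) : Int) - 1) + 1 - 0).toNat = 0 := by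
        simp only [List.length_cons] at h
        rw [Int.toNat_eq_zero]
        push_cast at h ⊢
        omega
      rw [hz]
      simp
  · rw [if_neg h]
    have hnn : ∀ c ∈ clue, 0 ≤ c := by
      rcases hpre with h' | h'
      · exact h'
      · exact absurd h' h
    have hmain := pvMain clue ((line.length : Int) - clue.sum - ((clue.length : Int) - 1)) []
      line.length hnn (by omega) (fun _ => by ring)
    simpa using hmain
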